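-- pv_equiv track=rewrite | github.com/AmmadIrshad/Compiler-construction-LA | Compiler-Construction-LA/lexical_analyzer.py | trim_start
-- ===== SOURCE A (Python) =====
-- def trim_start(text):
--     space_count = 0
--     line_count = 0
--     tab_count = 0
--     for i in range(len(text)):
--         if text[i] == ' ':
--             space_count += 1
--         elif text[i] == '\n':
--             line_count += 1
--         elif text[i] == '\t' or text[i] == '\r':
--             tab_count += 1
--         else:
--             break
--     return space_count, tab_count, line_count
-- ===== SOURCE B (Python) =====
-- def trim_start(text):
--     ws = (' ', '\n', '\t', '\r')
--     i = 0
--     while i < len(text) and text[i] in ws: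
--         i += 1
--     prefix = text[:i]
--     return prefix.count(' '), prefix.count('\t') + prefix.count('\r'), prefix.count('\n')
-- ===== Notes on version B (the rewrite author's own statement) =====
-- stated objective: idiomatic
-- what changed: B first extracts the leading-whitespace prefix (scan for the first non-whitespace index, then slice), then counts each character kind with separate str.count scans over the prefix, instead of A's single loop that classifies every character into three counters.
import Mathlib
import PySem

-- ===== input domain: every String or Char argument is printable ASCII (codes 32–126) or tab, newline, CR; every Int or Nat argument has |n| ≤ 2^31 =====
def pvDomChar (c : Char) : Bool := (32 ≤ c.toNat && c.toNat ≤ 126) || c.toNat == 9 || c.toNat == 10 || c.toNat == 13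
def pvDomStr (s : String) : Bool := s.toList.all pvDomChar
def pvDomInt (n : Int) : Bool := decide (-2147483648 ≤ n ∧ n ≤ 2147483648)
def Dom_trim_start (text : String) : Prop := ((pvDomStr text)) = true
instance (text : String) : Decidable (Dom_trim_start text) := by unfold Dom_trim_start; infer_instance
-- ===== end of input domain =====

-- B: extract the leading-whitespace prefix first, then count each kind with separate scans (idiomatic decomposition).
-- A's single classifying loop with three counters is replaced; return values are identical.

-- ===== PORT A =====
-- A's for-loop over indices with break, carrying the three counters; returns (space, tab+cr, newline).
def trimStartLoop : List Char → Int → Int → Int → Int × Int × Int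
  | [], space_count, line_count, tab_count => (space_count, tab_count, line_count)
  | c :: cs, space_count, line_count, tab_count =>
    if c = ' ' then trimStartLoop cs (space_count + 1) line_count tab_count
    else if c = '\n' then trimStartLoop cs space_count (line_count + 1) tab_count
    else if c = '\t' ∨ c = '\r' then trimStartLoop cs space_count line_count (tab_count + 1)
    else (space_count, tab_count, line_count)

def trim_start (text : String) : Int × Int × Int :=
  trimStartLoop text.toList 0 0 0

-- ===== PORT B =====
-- while i < len(text) and text[i] in ws: i += 1   — length of the leading-whitespace run
def wsRunLen : List Char → Nat
  | [] => 0
  | c :: cs => if c ∈ [' ', '\n', '\t', '\r'] then wsRunLen cs + 1 else 0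

def trim_start_alt (text : String) : Int × Int × Int :=
  let prefix_ := text.toList.take (wsRunLen text.toList)
  ((prefix_.count ' ' : Int), (prefix_.count '\t' : Int) + (prefix_.count '\r' : Int),
   (prefix_.count '\n' : Int))

-- ===== PRECONDITION & SPEC =====
def Spec_trim_start (text : String) (out : Int × Int × Int) : Prop := out = trim_start_alt text
instance (text : String) (out : Int × Int × Int) : Decidable (Spec_trim_start text out) := by unfold Spec_trim_start; infer_instance

-- ===== CLAIM (what is proved, stated in full; the proofs are below) =====
def Claim_equal_trim_start : Prop := ∀ (text : String), Dom_trim_start text → Spec_trim_start text (trim_start text)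

-- ===== LEMMAS AND PROOFS =====
lemma trimStartLoop_eq (cs : List Char) : ∀ (s l t : Int),
    trimStartLoop cs s l t =
      (s + ((cs.take (wsRunLen cs)).count ' ' : Int),
       t + ((cs.take (wsRunLen cs)).count '\t' : Int) + ((cs.take (wsRunLen cs)).count '\r' : Int),
       l + ((cs.take (wsRunLen cs)).count '\n' : Int)) := by
  induction cs with
  | nil => intro s l t; simp [trimStartLoop, wsRunLen]
  | cons c cs ih =>
    intro s l t
    by_cases h1 : c = ' '
    · subst h1
      simp [trimStartLoop, wsRunLen, ih]
      omega
    · by_cases h2 : c = '\n'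
      · subst h2
        simp [trimStartLoop, wsRunLen, h1, ih]
        omega
      · by_cases h3 : c = '\t' ∨ c = '\r'
        · rcases h3 with h3 | h3 <;> subst h3 <;>
            simp [trimStartLoop, wsRunLen, h1, h2, ih] <;> omega
        · obtain ⟨h4, h5⟩ := not_or.mp h3
          simp [trimStartLoop, wsRunLen, h1, h2, h4, h5]

-- ===== VERDICT (by name: the statement is the Claim_ definition above) =====
theorem trim_start_spec : Claim_equal_trim_start := by
  intro text _
  unfold Spec_trim_start trim_start trim_start_alt
  rw [trimStartLoop_eq]
  simp
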